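-- pv_equiv track=rewrite | github.com/sandeepkuswah/45_day_code | Day_20MAXTASTE.py | max_tastiness
-- ===== SOURCE A (Python) =====
-- def max_tastiness(test_cases):
--     results = []
--     for case in test_cases:
--         a, b, c, d = case
--         # Calculate tastiness for all combinations
--         tastiness_1 = a + c
--         tastiness_2 = a + d
--         tastiness_3 = b + c
--         tastiness_4 = b + d
--
--         # Find the maximum tastiness
--         max_tastiness = max(tastiness_1, tastiness_2, tastiness_3, tastiness_4)
--         results.append(max_tastiness)
--     return results
-- ===== SOURCE B (Python) =====
-- def max_tastiness(test_cases):
--     return [max(a, b) + max(c, d) for a, b, c, d in test_cases]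
-- ===== Notes on version B (the rewrite author's own statement) =====
-- stated objective: simpler
-- what changed: Replaces the loop that forms all four cross sums and takes their maximum with a single comprehension appending max(a,b)+max(c,d), using the distributivity of max over +.
import Mathlib
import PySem

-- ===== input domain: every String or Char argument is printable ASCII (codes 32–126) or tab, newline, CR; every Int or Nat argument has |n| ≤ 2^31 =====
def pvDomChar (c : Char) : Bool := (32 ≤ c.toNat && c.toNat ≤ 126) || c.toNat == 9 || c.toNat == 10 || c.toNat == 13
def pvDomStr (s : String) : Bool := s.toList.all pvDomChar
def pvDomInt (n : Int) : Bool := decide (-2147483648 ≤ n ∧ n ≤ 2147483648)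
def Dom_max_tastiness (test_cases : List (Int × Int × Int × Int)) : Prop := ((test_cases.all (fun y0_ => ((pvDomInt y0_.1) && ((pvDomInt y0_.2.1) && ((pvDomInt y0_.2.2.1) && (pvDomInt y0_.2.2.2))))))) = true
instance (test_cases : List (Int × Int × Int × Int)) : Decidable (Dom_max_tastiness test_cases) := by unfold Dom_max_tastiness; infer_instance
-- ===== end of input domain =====

-- B replaces the four cross sums + max with max(a,b)+max(c,d) per case (simpler decomposition).


-- ===== PORT A =====
-- results accumulator loop; for each case compute the four sums and append their max
def max_tastiness (test_cases : List (Int × Int × Int × Int)) : List Int :=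
  (test_cases.foldl (fun results case =>
    let a := case.1; let b := case.2.1; let c := case.2.2.1; let d := case.2.2.2
    let tastiness_1 := a + c
    let tastiness_2 := a + d
    let tastiness_3 := b + c
    let tastiness_4 := b + d
    let m := max (max (max tastiness_1 tastiness_2) tastiness_3) tastiness_4
    results ++ [m]) [])

-- ===== PORT B =====
-- one line: comprehension mapping each case to max(a,b) + max(c,d)
def max_tastiness_alt (test_cases : List (Int × Int × Int × Int)) : List Int :=
  test_cases.map (fun ⟨a, b, c, d⟩ => max a b + max c d)

-- ===== PRECONDITION & SPEC =====
def Spec_max_tastiness (test_cases : List (Int × Int × Int × Int)) (out : List Int) : Prop := out = max_tastiness_alt test_cases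
instance (test_cases : List (Int × Int × Int × Int)) (out : List Int) : Decidable (Spec_max_tastiness test_cases out) := by unfold Spec_max_tastiness; infer_instance

-- ===== CLAIM (what is proved, stated in full; the proofs are below) =====
def Claim_equal_max_tastiness : Prop := ∀ (test_cases : List (Int × Int × Int × Int)), Dom_max_tastiness test_cases → Spec_max_tastiness test_cases (max_tastiness test_cases)

-- ===== LEMMAS AND PROOFS =====

-- ===== VERDICT (by name: the statement is the Claim_ definition above) =====
theorem max_tastiness_a_eq (l : List (Int × Int × Int × Int)) (acc : List Int) :
    (l.foldl (fun results case =>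
      let a := case.1; let b := case.2.1; let c := case.2.2.1; let d := case.2.2.2
      let tastiness_1 := a + c
      let tastiness_2 := a + d
      let tastiness_3 := b + c
      let tastiness_4 := b + d
      let m := max (max (max tastiness_1 tastiness_2) tastiness_3) tastiness_4
      results ++ [m]) acc) = acc ++ max_tastiness_alt l := by
  induction l generalizing acc with
  | nil => simp [max_tastiness_alt]
  | cons h t ih =>
    obtain ⟨a, b, c, d⟩ := h
    simp only [List.foldl_cons, ih, max_tastiness_alt, List.map_cons, List.append_assoc]
    have hm : max (max (max (a + c) (a + d)) (b + c)) (b + d) = max a b + max c d := by omega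
    rw [hm]
    simp

theorem max_tastiness_spec : Claim_equal_max_tastiness := by
  intro tc _
  unfold Spec_max_tastiness max_tastiness
  simpa using max_tastiness_a_eq tc []
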